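-- pv_equiv track=rewrite | github.com/adehlbom/AoC2022 | 1/1.py | group_numbers
-- ===== SOURCE A (Python) =====
-- def group_numbers(list):
--     lists = [[]]
--     for i in list:
--         if i == "\n":
--             lists.append([])
--         else:
--             lists[-1].append(i)
--     return [[item.strip() for item in group] for group in lists]
-- ===== SOURCE B (Python) =====
-- def group_numbers(list):
--     # Staged: find separator positions, then slice between boundary markers.
--     seps = [i for i, x in enumerate(list) if x == "\n"]
--     bounds = [-1] + seps + [len(list)]
--     groups = [list[b + 1:e] for b, e in zip(bounds, bounds[1:])]
--     return [[item.strip() for item in group] for group in groups]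
-- ===== Notes on version B (the rewrite author's own statement) =====
-- stated objective: alternative
-- what changed: B replaces A's element-wise accumulator pass (append to the last nested group or start a new one) by staged passes: collect the indices of the newline separators, form boundary markers [-1]+seps+[len], and build each group by slicing the input between consecutive boundaries before stripping.
import Mathlib
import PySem

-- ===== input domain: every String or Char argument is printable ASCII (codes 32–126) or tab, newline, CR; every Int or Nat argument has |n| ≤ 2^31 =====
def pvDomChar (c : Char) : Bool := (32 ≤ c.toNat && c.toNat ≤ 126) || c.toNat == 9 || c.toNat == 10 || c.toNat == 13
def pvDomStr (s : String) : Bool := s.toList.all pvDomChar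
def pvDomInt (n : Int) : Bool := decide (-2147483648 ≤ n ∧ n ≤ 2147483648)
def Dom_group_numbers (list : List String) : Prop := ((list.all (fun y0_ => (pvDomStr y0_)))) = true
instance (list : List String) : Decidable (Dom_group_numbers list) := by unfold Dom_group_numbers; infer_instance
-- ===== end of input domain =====

-- B replaces A's element-wise accumulator pass by staged passes: it collects the
-- positions of the "\n" separators, forms boundary markers -1/len, and slices the
-- input between consecutive boundaries (objective: alternative decomposition).

-- ===== PORT A =====
-- one loop step of A: lists.append([]) / lists[-1].append(i)
def pvAStep (lists : List (List String)) (i : String) : List (List String) :=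
  if i = "\n" then lists ++ [[]]
  else lists.dropLast ++ [(lists.getLastD []) ++ [i]]

def group_numbers (list : List String) : List (List String) :=
  (list.foldl pvAStep [[]]).map (fun group => group.map (fun item => PySem.Str.strip item))

-- ===== PORT B =====
-- bounds = [-1] + [i for i, x in enumerate(list) if x == "\n"] + [len(list)]
def pvBounds (list : List String) : List Int :=
  -1 :: ((((PySem.List.enumerate list).filter (fun p => p.2 == "\n")).map (fun p => p.1))
    ++ [(list.length : Int)])

def group_numbers_alt (list : List String) : List (List String) :=
  -- groups = [list[b+1:e] for b, e in zip(bounds, bounds[1:])], then strip each item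
  (((pvBounds list).zip (PySem.List.slice (pvBounds list) (some 1) none)).map
      (fun p => PySem.List.slice list (some (p.1 + 1)) (some p.2))).map
    (fun group => group.map (fun item => PySem.Str.strip item))

-- ===== PRECONDITION & SPEC =====
def Spec_group_numbers (list : List String) (out : List (List String)) : Prop := out = group_numbers_alt list
instance (list : List String) (out : List (List String)) : Decidable (Spec_group_numbers list out) := by unfold Spec_group_numbers; infer_instance

-- ===== CLAIM =====
def Claim_equal_group_numbers : Prop := ∀ (list : List String), Dom_group_numbers list → Spec_group_numbers list (group_numbers list)

-- ===== LEMMAS AND PROOFS =====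

-- the raw (unstripped) groups, built from the front
def pvRaw : List String → List (List String)
  | [] => [[]]
  | x :: l =>
    if x = "\n" then [] :: pvRaw l
    else match pvRaw l with
      | g :: rest => (x :: g) :: rest
      | [] => [[x]]

def pvConsHead (g : List String) : List (List String) → List (List String)
  | h :: t => (g ++ h) :: t
  | [] => [g]

def pvMStrip (g : List String) : List String :=
  g.map (fun item => PySem.Str.strip item)

theorem pvRaw_ne_nil (l : List String) : pvRaw l ≠ [] := by
  cases l with
  | nil => simp [pvRaw]
  | cons x l =>
    simp only [pvRaw]
    split
    · simp
    · cases h : pvRaw l <;> simp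

theorem pvFoldl_raw (l : List String) (pre : List (List String)) (g : List String) :
    l.foldl pvAStep (pre ++ [g]) = pre ++ pvConsHead g (pvRaw l) := by
  induction l generalizing pre g with
  | nil => simp [pvRaw, pvConsHead]
  | cons x l ih =>
    by_cases hx : x = "\n"
    · have h1 : pvAStep (pre ++ [g]) x = (pre ++ [g]) ++ [[]] := by
        simp [pvAStep, hx]
      rw [List.foldl_cons, h1, ih]
      cases h : pvRaw l with
      | nil => exact absurd h (pvRaw_ne_nil l)
      | cons h' t => simp [pvRaw, hx, h, pvConsHead]
    · have h1 : pvAStep (pre ++ [g]) x = pre ++ [g ++ [x]] := by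
        simp [pvAStep, hx]
      rw [List.foldl_cons, h1, ih]
      cases h : pvRaw l with
      | nil => exact absurd h (pvRaw_ne_nil l)
      | cons h' t => simp [pvRaw, hx, h, pvConsHead]

-- Nat-level separator indices of l
def pvSepN : List String → List Nat
  | [] => []
  | x :: l =>
    if x = "\n" then 0 :: (pvSepN l).map (· + 1)
    else (pvSepN l).map (· + 1)

-- groups by slicing between consecutive Nat boundaries (a = current start)
def pvGrpN (l : List String) : Nat → List Nat → List (List String)
  | a, [] => [l.drop a]
  | a, e :: s => ((l.drop a).take (e - a)) :: pvGrpN l (e + 1) s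

theorem pvEnum_sep (l : List String) (s : Int) :
    (((PySem.List.enumerate l s).filter (fun p => p.2 == "\n")).map (fun p => p.1))
      = (pvSepN l).map (fun (k : Nat) => s + (k : Int)) := by
  induction l generalizing s with
  | nil => simp [PySem.List.enumerate_nil, pvSepN]
  | cons x l ih =>
    rw [PySem.List.enumerate_cons]
    by_cases hx : x = "\n"
    · have hb : (x == "\n") = true := by simp [hx]
      simp only [List.filter_cons, hb, if_true, List.map_cons, pvSepN, if_pos hx]
      rw [ih]
      congr 1
      · simp
      · rw [List.map_map]
        apply List.map_congr_left; intro k _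
        simp only [Function.comp_apply]; push_cast; ring
    · have hb : (x == "\n") = false := by simp [hx]
      simp only [List.filter_cons, hb, Bool.false_eq_true, if_false, pvSepN, if_neg hx]
      rw [ih, List.map_map]
      apply List.map_congr_left; intro k _
      simp only [Function.comp_apply]; push_cast; ring

-- the Int zip-of-boundaries computation equals pvGrpN (start a encoded as a-1)
theorem pvZip_grp (l : List String) (a : Nat) (s : List Nat) :
    (((((a : Int) - 1) :: ((s.map (fun (k : Nat) => (k : Int))) ++ [(l.length : Int)])).zip
        ((s.map (fun (k : Nat) => (k : Int))) ++ [(l.length : Int)])).map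
      (fun p => PySem.List.slice l (some (p.1 + 1)) (some p.2)))
      = pvGrpN l a s := by
  induction s generalizing a with
  | nil =>
    simp only [List.map_nil, List.nil_append, List.zip_cons_cons, List.zip_nil_right,
      List.map_cons, List.map_nil, pvGrpN]
    have h1 : (a : Int) - 1 + 1 = (a : Int) := by ring
    rw [h1, PySem.List.slice_natCast]
    congr 1
    apply List.take_of_length_le
    simp [List.length_drop]
  | cons e s ih =>
    simp only [List.map_cons, List.cons_append, List.zip_cons_cons, List.map_cons, pvGrpN]
    congr 1
    · have h1 : (a : Int) - 1 + 1 = (a : Int) := by ring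
      rw [h1, PySem.List.slice_natCast]
    · have h2 : (e : Int) = ((e + 1 : Nat) : Int) - 1 := by push_cast; ring
      rw [h2]
      exact ih (e + 1)

-- shifting: grouping x::t from start a+1 with shifted separators is grouping t from a
theorem pvGrpN_shift (x : String) (t : List String) (a : Nat) (s : List Nat) :
    pvGrpN (x :: t) (a + 1) (s.map (· + 1)) = pvGrpN t a s := by
  induction s generalizing a with
  | nil => simp [pvGrpN]
  | cons e s ih =>
    simp only [List.map_cons, pvGrpN, List.drop_succ_cons]
    congr 1
    · congr 1; omega
    · exact ih (e + 1)

theorem pvGrpN_sep (l : List String) : pvGrpN l 0 (pvSepN l) = pvRaw l := by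
  induction l with
  | nil => simp [pvSepN, pvGrpN, pvRaw]
  | cons x t ih =>
    by_cases hx : x = "\n"
    · simp only [pvSepN, if_pos hx, pvGrpN, List.drop_zero]
      rw [show (1 : Nat) = 0 + 1 from rfl, pvGrpN_shift, ih]
      simp [pvRaw, hx]
    · simp only [pvSepN, if_neg hx]
      cases hs : pvSepN t with
      | nil =>
        rw [hs] at ih
        simp only [List.map_nil, pvGrpN, List.drop_zero]
        simp only [pvGrpN] at ih
        simp only [pvRaw, if_neg hx, ← ih]
        simp
      | cons e s' =>
        rw [hs] at ih
        simp only [List.map_cons, pvGrpN, List.drop_zero, Nat.sub_zero, List.take_succ_cons]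
        rw [pvGrpN_shift x t (e + 1) s']
        simp only [pvGrpN, List.drop_zero, Nat.sub_zero] at ih
        simp [pvRaw, if_neg hx, ← ih]

-- ===== VERDICT =====
theorem group_numbers_spec : Claim_equal_group_numbers := by
  intro l _
  unfold Spec_group_numbers group_numbers group_numbers_alt pvBounds
  have hA := pvFoldl_raw l [] []
  simp only [List.nil_append] at hA
  rw [hA, PySem.List.slice_from_one]
  have hE := pvEnum_sep l 0
  simp only [zero_add] at hE
  rw [hE]
  have hZ := pvZip_grp l 0 (pvSepN l)
  simp only [Nat.cast_zero, zero_sub] at hZ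
  simp only [List.tail_cons]
  rw [hZ, pvGrpN_sep]
  cases hr : pvRaw l with
  | nil => exact absurd hr (pvRaw_ne_nil l)
  | cons g rest => simp [pvConsHead]
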